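-- pv_equiv track=rewrite | github.com/VidvattaLearn/ai-engineering-for-bfsi-dec | VoiceAgents/next plus fastapi/backend/src/utils/streaming.py | split_text_for_tts
-- ===== SOURCE A (Python) =====
-- from typing import Iterable, List
--
-- SENTENCE_ENDINGS = (".", "!", "?", "\n")
--
-- def split_text_for_tts(text: str, min_chars: int = 80) -> List[str]:
--     chunks: List[str] = []
--     buffer = ""
--     for char in text:
--         buffer += char
--         if len(buffer) >= min_chars and buffer.endswith(SENTENCE_ENDINGS):
--             chunks.append(buffer.strip())
--             buffer = ""
--     if buffer.strip():
--         chunks.append(buffer.strip())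
--     return chunks
-- ===== SOURCE B (Python) =====
-- from typing import List
--
-- SENTENCE_ENDINGS = (".", "!", "?", "\n")
--
--
-- def _sentence_segments(text: str) -> List[str]:
--     """Tokenize text into maximal segments each ending at a sentence-ending char,
--     plus a trailing remainder segment if any."""
--     segments: List[str] = []
--     cur = ""
--     for ch in text:
--         cur += ch
--         if ch in SENTENCE_ENDINGS:
--             segments.append(cur)
--             cur = ""
--     if cur:
--         segments.append(cur)
--     return segments
--
--
-- def split_text_for_tts(text: str, min_chars: int = 80) -> List[str]:
--     chunks: List[str] = []
--     current = ""
--     for seg in _sentence_segments(text):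
--         current += seg
--         if len(current) >= min_chars and current[-1] in SENTENCE_ENDINGS:
--             chunks.append(current.strip())
--             current = ""
--     if current.strip():
--         chunks.append(current.strip())
--     return chunks
-- ===== Notes on version B (the rewrite author's own statement) =====
-- stated objective: alternative
-- what changed: Replaces A's char-by-char buffer with a check at every character by a two-phase decomposition: first tokenize the text into sentence segments (ending at .!?\n), then greedily regroup whole segments into chunks of at least min_chars.
import Mathlib
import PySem

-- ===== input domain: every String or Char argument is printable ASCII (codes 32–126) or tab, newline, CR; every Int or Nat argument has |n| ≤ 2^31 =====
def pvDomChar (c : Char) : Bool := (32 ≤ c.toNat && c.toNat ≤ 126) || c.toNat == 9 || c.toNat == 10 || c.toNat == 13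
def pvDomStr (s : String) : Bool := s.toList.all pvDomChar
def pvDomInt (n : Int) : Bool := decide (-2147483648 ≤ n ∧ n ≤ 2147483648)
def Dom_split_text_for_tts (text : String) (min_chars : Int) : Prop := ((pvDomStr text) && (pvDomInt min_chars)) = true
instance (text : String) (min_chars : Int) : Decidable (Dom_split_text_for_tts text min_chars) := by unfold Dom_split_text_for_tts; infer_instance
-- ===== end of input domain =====

-- B replaces A's char-by-char buffer loop with a two-phase decomposition (tokenize into
-- sentence segments, then greedily regroup segments); alternative structure, same cost.

-- ===== PORT A =====
-- buffer.endswith(SENTENCE_ENDINGS): endswith with each element of the tuple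
def pvEndsAny (b : List Char) : Bool :=
  PySem.Chars.endswith b ['.'] || PySem.Chars.endswith b ['!'] ||
  PySem.Chars.endswith b ['?'] || PySem.Chars.endswith b ['\n']

-- the for-loop of A, state (chunks, buffer)
def pvALoop (min_chars : Int) : List Char → List String → List Char → List String × List Char
  | [], chunks, buffer => (chunks, buffer)
  | c :: cs, chunks, buffer =>
    let b := buffer ++ [c]
    if (min_chars ≤ (b.length : Int)) && pvEndsAny b then
      pvALoop min_chars cs (chunks ++ [String.ofList (PySem.Chars.strip b)]) []
    else
      pvALoop min_chars cs chunks b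

-- the post-loop flush of A ('if buffer.strip(): chunks.append(buffer.strip())')
def pvAFinish (r : List String × List Char) : List String :=
  if (PySem.Chars.strip r.2).isEmpty then r.1 else r.1 ++ [String.ofList (PySem.Chars.strip r.2)]

def split_text_for_tts (text : String) (min_chars : Int) : List String :=
  pvAFinish (pvALoop min_chars text.toList [] [])

-- ===== PORT B =====
-- ch in SENTENCE_ENDINGS (tuple membership)
def pvIsEnding (c : Char) : Bool := c == '.' || c == '!' || c == '?' || c == '\n'

-- _sentence_segments: for ch in text, state (segments, cur)
def pvSegLoop : List Char → List (List Char) → List Char → List (List Char)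
  | [], segments, cur => if cur.isEmpty then segments else segments ++ [cur]
  | c :: cs, segments, cur =>
    let cur' := cur ++ [c]
    if pvIsEnding c then pvSegLoop cs (segments ++ [cur']) [] else pvSegLoop cs segments cur'

-- the grouping loop of B, state (chunks, current); current[-1] via pyGet? (segments are nonempty)
def pvBGroup (min_chars : Int) : List (List Char) → List String → List Char → List String
  | [], chunks, current =>
    if (PySem.Chars.strip current).isEmpty then chunks
    else chunks ++ [String.ofList (PySem.Chars.strip current)]
  | s :: ss, chunks, current =>
    let cur' := current ++ s
    if (min_chars ≤ (cur'.length : Int)) && ((PySem.List.pyGet? cur' (-1)).elim false pvIsEnding) then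
      pvBGroup min_chars ss (chunks ++ [String.ofList (PySem.Chars.strip cur')]) []
    else
      pvBGroup min_chars ss chunks cur'

def split_text_for_tts_alt (text : String) (min_chars : Int) : List String :=
  pvBGroup min_chars (pvSegLoop text.toList [] []) [] []

-- ===== PRECONDITION & SPEC =====
def Spec_split_text_for_tts (text : String) (min_chars : Int) (out : List String) : Prop := out = split_text_for_tts_alt text min_chars
instance (text : String) (min_chars : Int) (out : List String) : Decidable (Spec_split_text_for_tts text min_chars out) := by unfold Spec_split_text_for_tts; infer_instance

-- ===== CLAIM (what is proved, stated in full; the proofs are below) =====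
def Claim_equal_split_text_for_tts : Prop := ∀ (text : String) (min_chars : Int), Dom_split_text_for_tts text min_chars → Spec_split_text_for_tts text min_chars (split_text_for_tts text min_chars)

-- ===== LEMMAS AND PROOFS =====

-- non-accumulator form of the tokenizer
def pvTok : List Char → List Char → List (List Char)
  | [], cur => if cur.isEmpty then [] else [cur]
  | c :: cs, cur =>
    if pvIsEnding c then (cur ++ [c]) :: pvTok cs [] else pvTok cs (cur ++ [c])

theorem pvSegLoop_eq (cs : List Char) : ∀ (segs : List (List Char)) (cur : List Char),
    pvSegLoop cs segs cur = segs ++ pvTok cs cur := by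
  induction cs with
  | nil => intro segs cur; by_cases h : cur.isEmpty <;> simp [pvSegLoop, pvTok, h]
  | cons c cs ih =>
    intro segs cur
    by_cases h : pvIsEnding c <;> simp [pvSegLoop, pvTok, h, ih]

theorem pvEndsAny_concat (l : List Char) (c : Char) : pvEndsAny (l ++ [c]) = pvIsEnding c := by
  have h : ∀ d : Char, PySem.Chars.endswith (l ++ [c]) [d] = (c == d) := by
    intro d
    rw [Bool.eq_iff_iff, PySem.Chars.endswith_iff, beq_iff_eq]
    constructor
    · rintro ⟨t, ht⟩
      have := congrArg List.getLast? ht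
      simpa using this.symm
    · rintro rfl; exact ⟨l, rfl⟩
  simp [pvEndsAny, pvIsEnding, h]

theorem pvGetLast (l : List Char) (c : Char) :
    PySem.List.pyGet? (l ++ [c]) (-1) = some c := by
  simp [PySem.List.pyGet?, PySem.List.pyIdx?]

theorem pvNoFlush (m : Int) (w : List Char) : ∀ (ch : List String) (buf : List Char),
    (∀ c ∈ w, pvIsEnding c = false) → pvALoop m w ch buf = (ch, buf ++ w) := by
  induction w with
  | nil => intro ch buf _; simp [pvALoop]
  | cons c cs ih =>
    intro ch buf h
    have hc : pvIsEnding c = false := h c (by simp)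
    simp only [pvALoop, pvEndsAny_concat, hc, Bool.and_false]
    rw [if_neg (by simp), ih ch (buf ++ [c]) (fun d hd => h d (by simp [hd]))]
    simp

theorem pvALoop_append (m : Int) (xs : List Char) : ∀ (ys : List Char) (ch : List String) (buf : List Char),
    pvALoop m (xs ++ ys) ch buf =
      pvALoop m ys (pvALoop m xs ch buf).1 (pvALoop m xs ch buf).2 := by
  induction xs with
  | nil => intro ys ch buf; simp [pvALoop]
  | cons c cs ih =>
    intro ys ch buf
    simp only [List.cons_append, pvALoop]
    split <;> rename_i h <;> simp [ih]

theorem pvMain (m : Int) (cs : List Char) : ∀ (cur : List Char) (ch : List String) (buf : List Char),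
    (∀ c ∈ cur, pvIsEnding c = false) →
    pvBGroup m (pvTok cs cur) ch buf = pvAFinish (pvALoop m (cur ++ cs) ch buf) := by
  induction cs with
  | nil =>
    intro cur ch buf h
    rcases cur.eq_nil_or_concat with rfl | ⟨q, d, hqd⟩
    · simp [pvTok, pvBGroup, pvALoop, pvAFinish]
    · subst hqd
      simp only [List.concat_eq_append] at h ⊢
      have hd : pvIsEnding d = false := h d (by simp)
      have ht : pvTok [] (q ++ [d]) = [q ++ [d]] := by simp [pvTok]
      rw [List.append_nil, ht, pvNoFlush m (q ++ [d]) ch buf h]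
      simp [pvBGroup, pvAFinish, ← List.append_assoc, hd]
  | cons c cs ih =>
    intro cur ch buf h
    have ih0 : ∀ (ch' : List String) (buf' : List Char),
        pvBGroup m (pvTok cs []) ch' buf' = pvAFinish (pvALoop m cs ch' buf') := by
      intro ch' buf'
      simpa using ih [] ch' buf' (by simp)
    by_cases hc : pvIsEnding c
    · rw [pvALoop_append, pvNoFlush m cur ch buf h]
      simp only [pvTok, if_pos hc, pvBGroup, pvALoop, ← List.append_assoc]
      rw [pvGetLast (buf ++ cur) c, pvEndsAny_concat]
      simp only [Option.elim, hc, Bool.and_true]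
      split <;> rw [ih0]
    · have hstep : cur ++ c :: cs = (cur ++ [c]) ++ cs := by simp
      rw [hstep]
      simp only [pvTok, if_neg hc]
      exact ih (cur ++ [c]) ch buf (by
        intro d hd
        rcases List.mem_append.mp hd with h1 | h1
        · exact h d h1
        · simp at h1; subst h1; simpa using hc)

-- ===== VERDICT (by name: the statement is the Claim_ definition above) =====
theorem split_text_for_tts_spec : Claim_equal_split_text_for_tts := by
  intro text m _
  unfold Spec_split_text_for_tts split_text_for_tts split_text_for_tts_alt
  rw [pvSegLoop_eq, List.nil_append, pvMain m text.toList [] [] [] (by simp)]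
  simp
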